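-- pv_equiv track=rewrite | github.com/Andres1992MJ/Curso_Python_Udemy_1 | Proyecto_1/10-archivos/descomprimidos/tipos-avanzados/15-Ejercicio-final.py | mayorRepeticion
-- ===== SOURCE A (Python) =====
-- def mayorRepeticion(list):
--     listrespusta=[]
--     rep=0
--     for valor in list:
--         if valor[1]>rep:
--             rep=valor[1]
--
--     for valor in list:
--         if valor[1]==rep:
--             listrespusta.append(valor)
--     return listrespusta
-- ===== SOURCE B (Python) =====
-- def mayorRepeticion(list):
--     rep = 0
--     result = []
--     for valor in list:
--         if valor[1] > rep:
--             rep = valor[1]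
--             result = [valor]
--         elif valor[1] == rep:
--             result.append(valor)
--     return result
-- ===== Notes on version B (the rewrite author's own statement) =====
-- stated objective: alternative
-- what changed: Fuses A's two passes (max-scan then filter-scan) into a single pass maintaining a running maximum and a running collection that resets on a new strict max.
import Mathlib
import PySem

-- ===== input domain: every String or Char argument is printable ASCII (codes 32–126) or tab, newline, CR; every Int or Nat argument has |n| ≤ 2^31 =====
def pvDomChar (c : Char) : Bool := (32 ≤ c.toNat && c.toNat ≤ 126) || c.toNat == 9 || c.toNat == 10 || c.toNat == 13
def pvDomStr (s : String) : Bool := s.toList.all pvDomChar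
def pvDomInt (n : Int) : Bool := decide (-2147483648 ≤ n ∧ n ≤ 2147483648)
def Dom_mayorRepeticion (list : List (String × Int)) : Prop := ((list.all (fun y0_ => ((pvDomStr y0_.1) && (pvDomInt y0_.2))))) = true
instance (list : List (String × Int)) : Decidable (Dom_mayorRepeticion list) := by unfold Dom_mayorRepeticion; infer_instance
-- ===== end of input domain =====

-- B fuses A's two passes (max-scan then filter-scan) into one pass with a running max
-- and a collection reset on each new strict maximum (objective: alternative one-pass decomposition).


-- ===== PORT A =====
-- first loop of A: running maximum starting from rep
def pvMaxLoop (l : List (String × Int)) (rep : Int) : Int :=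
  l.foldl (fun rep valor => if valor.2 > rep then valor.2 else rep) rep

def mayorRepeticion (list : List (String × Int)) : List (String × Int) :=
  let rep := pvMaxLoop list 0
  list.foldl (fun acc valor => if valor.2 = rep then acc ++ [valor] else acc) []

-- ===== PORT B =====
-- one step of B's single loop over the state (rep, result)
def pvStep (s : Int × List (String × Int)) (valor : String × Int) : Int × List (String × Int) :=
  if valor.2 > s.1 then (valor.2, [valor])
  else if valor.2 = s.1 then (s.1, s.2 ++ [valor])
  else s

def mayorRepeticion_alt (list : List (String × Int)) : List (String × Int) :=
  (list.foldl pvStep (0, [])).2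

-- ===== PRECONDITION & SPEC =====
def Spec_mayorRepeticion (list : List (String × Int)) (out : List (String × Int)) : Prop := out = mayorRepeticion_alt list
instance (list : List (String × Int)) (out : List (String × Int)) : Decidable (Spec_mayorRepeticion list out) := by unfold Spec_mayorRepeticion; infer_instance

-- ===== CLAIM (what is proved, stated in full; the proofs are below) =====
def Claim_equal_mayorRepeticion : Prop := ∀ (list : List (String × Int)), Dom_mayorRepeticion list → Spec_mayorRepeticion list (mayorRepeticion list)

-- ===== LEMMAS AND PROOFS =====

theorem pvMaxLoop_ge (l : List (String × Int)) (r : Int) : r ≤ pvMaxLoop l r := by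
  induction l generalizing r with
  | nil => simp [pvMaxLoop]
  | cons v t ih =>
    simp only [pvMaxLoop, List.foldl_cons]
    by_cases h : v.2 > r
    · simp only [if_pos h]
      exact le_of_lt (lt_of_lt_of_le h (ih v.2))
    · simp only [if_neg h]
      exact ih r

-- A's second loop is 'acc ++ filter'
theorem pvFilterLoop (l : List (String × Int)) (rep : Int) (acc : List (String × Int)) :
    l.foldl (fun acc valor => if valor.2 = rep then acc ++ [valor] else acc) acc
      = acc ++ l.filter (fun valor => decide (valor.2 = rep)) := by
  induction l generalizing acc with
  | nil => simp
  | cons v t ih =>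
    simp only [List.foldl_cons, List.filter_cons]
    by_cases h : v.2 = rep
    · simp [h, ih]
    · simp [h, ih]

-- invariant of B's single loop
theorem pvStepLoop (l : List (String × Int)) (r : Int) (acc : List (String × Int)) :
    l.foldl pvStep (r, acc)
      = (pvMaxLoop l r,
         (if pvMaxLoop l r = r then acc else [])
           ++ l.filter (fun valor => decide (valor.2 = pvMaxLoop l r))) := by
  induction l generalizing r acc with
  | nil => simp [pvMaxLoop]
  | cons v t ih =>
    have hM : pvMaxLoop (v :: t) r
        = pvMaxLoop t (if v.2 > r then v.2 else r) := by
      simp [pvMaxLoop]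
    by_cases h : v.2 > r
    · have hstep : pvStep (r, acc) v = (v.2, [v]) := by simp [pvStep, h]
      have hMv : pvMaxLoop (v :: t) r = pvMaxLoop t v.2 := by simp [hM, h]
      have hge : v.2 ≤ pvMaxLoop t v.2 := pvMaxLoop_ge t v.2
      have hne : pvMaxLoop t v.2 ≠ r := by omega
      simp only [List.foldl_cons, hstep, ih, hMv, if_neg hne, List.filter_cons]
      by_cases hv : v.2 = pvMaxLoop t v.2
      · rw [if_pos hv.symm, if_pos (decide_eq_true hv)]; simp
      · rw [if_neg (fun hc => hv hc.symm), if_neg (by simp [hv])]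
    · have hMv : pvMaxLoop (v :: t) r = pvMaxLoop t r := by simp [hM, h]
      by_cases he : v.2 = r
      · have hstep : pvStep (r, acc) v = (r, acc ++ [v]) := by simp [pvStep, he]
        simp only [List.foldl_cons, hstep, ih, hMv, List.filter_cons]
        by_cases hMr : pvMaxLoop t r = r
        · simp [hMr, he, List.append_assoc]
        · have : v.2 ≠ pvMaxLoop t r := by rw [he]; exact fun hc => hMr hc.symm
          simp [hMr, this]
      · have hstep : pvStep (r, acc) v = (r, acc) := by simp [pvStep, h, he]
        have hlt : v.2 < r := lt_of_le_of_ne (not_lt.mp h) he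
        have : v.2 ≠ pvMaxLoop t r := by
          have := pvMaxLoop_ge t r; omega
        simp only [List.foldl_cons, hstep, ih, hMv, List.filter_cons]
        simp [this]

-- ===== VERDICT (by name: the statement is the Claim_ definition above) =====
theorem mayorRepeticion_spec : Claim_equal_mayorRepeticion := by
  intro list _
  unfold Spec_mayorRepeticion mayorRepeticion mayorRepeticion_alt
  rw [pvStepLoop, pvFilterLoop]
  by_cases h : pvMaxLoop list 0 = 0 <;> simp [h]
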